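-- pv_equiv track=rewrite | github.com/mohi-othman/mohi-euler-python | Euler041.py | addDigit
-- ===== SOURCE A (Python) =====
-- def addDigit(digitsSoFar, digitsLeft, resultList):
--     for d in digitsLeft:
--         myDigitsSoFar = list(digitsSoFar)
--         myDigitsLeft = list(digitsLeft)
--         myDigitsSoFar.append(str(d))
--         myDigitsLeft.remove(d)
--         if len(myDigitsLeft) == 0:
--             resultList.append(''.join(myDigitsSoFar))
--         else:
--             addDigit(myDigitsSoFar, myDigitsLeft, resultList)
--
--     return resultList
-- ===== SOURCE B (Python) =====
-- # Iterative re-implementation: explicit stack DFS with string prefixes instead of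
-- # recursion over copied lists.  Return-value equivalence only: A appends to
-- # resultList in place; B leaves its arguments untouched and returns a new list.
-- def addDigit(digitsSoFar, digitsLeft, resultList):
--     out = list(resultList)
--     if digitsLeft:
--         stack = [(''.join(digitsSoFar), list(digitsLeft))]
--         while stack:
--             prefix, left = stack.pop()
--             if not left:
--                 out.append(prefix)
--             else:
--                 for d in reversed(left):
--                     rest = list(left)
--                     rest.remove(d)
--                     stack.append((prefix + str(d), rest))
--     return out
-- ===== Notes on version B (the rewrite author's own statement) =====
-- stated objective: alternative
-- what changed: Replaces A's recursion (which copies digitsSoFar and digitsLeft at every level, mutates resultList in place and joins the whole digit list at each leaf) with an iterative depth-first search over an explicit stack of (prefix string, remaining digits) frames, joining the prefix once up front and never mutating the arguments.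
import Mathlib
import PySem

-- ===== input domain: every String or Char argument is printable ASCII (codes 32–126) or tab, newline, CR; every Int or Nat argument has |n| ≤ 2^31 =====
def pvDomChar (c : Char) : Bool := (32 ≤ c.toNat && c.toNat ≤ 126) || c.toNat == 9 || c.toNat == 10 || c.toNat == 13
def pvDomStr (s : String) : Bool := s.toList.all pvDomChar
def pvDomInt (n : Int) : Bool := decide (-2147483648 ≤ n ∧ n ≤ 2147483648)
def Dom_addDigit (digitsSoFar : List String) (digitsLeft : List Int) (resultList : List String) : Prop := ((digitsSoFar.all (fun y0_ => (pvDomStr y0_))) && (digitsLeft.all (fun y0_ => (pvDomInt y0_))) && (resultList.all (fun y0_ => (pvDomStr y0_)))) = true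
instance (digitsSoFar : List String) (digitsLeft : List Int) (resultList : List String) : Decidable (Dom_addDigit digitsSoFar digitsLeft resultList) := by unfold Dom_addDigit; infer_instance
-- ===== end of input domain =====

-- B replaces A's recursion (fresh list copies at every level, a join at every leaf) by an
-- iterative DFS over an explicit stack of (prefix string, remaining digits) frames.
-- Return-value equivalence only: Python A appends to resultList in place, B does not mutate it.

-- used by the ports' decreasing_by: removing an element shortens the list by one
theorem pvRemoveLen {dl myL : List Int} {d : Int}
    (h : PySem.List.remove? dl d = some myL) : myL.length + 1 = dl.length := by
  have hd : d ∈ dl := by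
    by_contra hn
    rw [(PySem.List.remove?_eq_none_iff dl d).mpr hn] at h; cases h
  rw [PySem.List.remove?_eq_some_erase dl d hd] at h
  cases h
  cases dl with
  | nil => cases hd
  | cons x xs => simp [List.length_erase_of_mem hd]

-- ===== PORT A =====
-- the body of A: iterate over `iter` (initially digitsLeft itself); dl is the enclosing
-- call's digitsLeft; the `none` branch of remove? is unreachable (d is drawn from dl).
def addDigitGo (sf : List String) (dl : List Int) (res : List String) : List Int → List String
  | [] => res
  | d :: rest =>
    let myS := sf ++ [PySem.Int.toStr d]
    match _h : PySem.List.remove? dl d with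
    | none => addDigitGo sf dl res rest
    | some myL =>
      let res' := if myL.length = 0 then res ++ [PySem.Str.join "" myS]
                  else addDigitGo myS myL res myL
      addDigitGo sf dl res' rest
termination_by iter => (dl.length, iter.length)
decreasing_by
  · exact Prod.Lex.right _ (by simp)
  · exact Prod.Lex.left _ _ (by have := pvRemoveLen _h; omega)
  · exact Prod.Lex.right _ (by simp)

def addDigit (digitsSoFar : List String) (digitsLeft : List Int) (resultList : List String) : List String :=
  addDigitGo digitsSoFar digitsLeft resultList digitsLeft

-- ===== PORT B =====
-- used by port B's decreasing_by: each child frame weighs at most left.length!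
theorem pvChildWeight (_pre : String) (left : List Int) (d : Int) :
    Nat.factorial (((PySem.List.remove? left d).getD []).length + 1)
      ≤ Nat.factorial left.length := by
  cases hrem : PySem.List.remove? left d with
  | none =>
    have := Nat.factorial_pos left.length
    simpa [Nat.factorial] using this
  | some myL =>
    apply Nat.factorial_le
    have := pvRemoveLen hrem
    simp
    omega

-- the while-loop of Source B; the Lean list's head is the Python stack's top (children are
-- pushed in reversed order in Python so that they pop left-to-right, which is exactly
-- consing them in order here).  `.getD []` only makes remove? total (d is in left).
def addDigitAltGo : List (String × List Int) → List String → List String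
  | [], out => out
  | (prefix_, left) :: rest, out =>
    if left = [] then addDigitAltGo rest (out ++ [prefix_])
    else
      addDigitAltGo
        ((left.map (fun d => (prefix_ ++ PySem.Int.toStr d, (PySem.List.remove? left d).getD []))) ++ rest)
        out
termination_by stack => (stack.map (fun fr => Nat.factorial (fr.2.length + 1))).sum
decreasing_by
  · simp only [List.map_cons, List.sum_cons]
    have := Nat.factorial_pos (left.length + 1)
    omega
  · rename_i _hne
    simp only [List.map_append, List.sum_append, List.map_map, List.map_cons, List.sum_cons,
      Function.comp_def]
    rw [List.attach_map_val (l := left)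
      (f := fun d => (((PySem.List.remove? left d).getD []).length + 1).factorial)]
    have hb : ∀ d ∈ left,
        (((prefix_ ++ PySem.Int.toStr d, (PySem.List.remove? left d).getD []) : String × List Int).2.length + 1).factorial
          ≤ left.length.factorial := fun d _ => pvChildWeight prefix_ left d
    have h1 := List.sum_le_sum hb
    rw [List.map_const', List.sum_replicate] at h1
    simp only [smul_eq_mul] at h1
    have h3 : left.length * left.length.factorial < (left.length + 1).factorial := by
      rw [Nat.factorial_succ]
      have := Nat.factorial_pos left.length
      nlinarith
    omega

def addDigit_alt (digitsSoFar : List String) (digitsLeft : List Int) (resultList : List String) : List String :=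
  let out := resultList
  if digitsLeft = [] then out
  else addDigitAltGo [(PySem.Str.join "" digitsSoFar, digitsLeft)] out

-- ===== PRECONDITION & SPEC =====
def Spec_addDigit (digitsSoFar : List String) (digitsLeft : List Int) (resultList : List String) (out : List String) : Prop := out = addDigit_alt digitsSoFar digitsLeft resultList
instance (digitsSoFar : List String) (digitsLeft : List Int) (resultList : List String) (out : List String) : Decidable (Spec_addDigit digitsSoFar digitsLeft resultList out) := by unfold Spec_addDigit; infer_instance

-- ===== CLAIM (what is proved, stated in full; the proofs are below) =====
def Claim_equal_addDigit : Prop := ∀ (digitsSoFar : List String) (digitsLeft : List Int) (resultList : List String), Dom_addDigit digitsSoFar digitsLeft resultList → Spec_addDigit digitsSoFar digitsLeft resultList (addDigit digitsSoFar digitsLeft resultList)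

-- ===== LEMMAS AND PROOFS =====

-- the common specification: all permutation strings of dl, in first-match-removal order
def pvPerms : Nat → List Int → List String
  | 0, _ => []
  | n+1, dl => dl.flatMap (fun d =>
      match PySem.List.remove? dl d with
      | none => []
      | some myL =>
        if myL.length = 0 then [PySem.Int.toStr d]
        else (pvPerms n myL).map (fun p => PySem.Int.toStr d ++ p))

theorem pvJoinNilFlatten (parts : List (List Char)) :
    PySem.Chars.join [] parts = parts.flatten := by
  induction parts with
  | nil => simp [PySem.Chars.join_nil]
  | cons a rest ih =>
    cases rest with
    | nil => simp [PySem.Chars.join_singleton]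
    | cons b r => rw [PySem.Chars.join_cons_cons]; simp_all

theorem pvJoin_snoc (sf : List String) (t : String) :
    PySem.Str.join "" (sf ++ [t]) = PySem.Str.join "" sf ++ t := by
  apply String.toList_inj.mp
  simp [PySem.Str.toList_join, pvJoinNilFlatten]

-- one unfolding step of addDigitGo on a cons, with remove? resolved
theorem pvGoA_cons (sf : List String) (dl : List Int) (res : List String) (d : Int)
    (rest : List Int) (myL : List Int) (hrem : PySem.List.remove? dl d = some myL) :
    addDigitGo sf dl res (d :: rest)
      = (if myL.length = 0
         then addDigitGo sf dl (res ++ [PySem.Str.join "" (sf ++ [PySem.Int.toStr d])]) rest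
         else addDigitGo sf dl (addDigitGo (sf ++ [PySem.Int.toStr d]) myL res myL) rest) := by
  rw [addDigitGo]
  split
  · rename_i heq
    rw [hrem] at heq
    cases heq
  · rename_i myL' heq
    rw [hrem] at heq
    injection heq with h'
    subst h'
    split <;> rfl

-- the one-level expansion both programs perform
theorem pvExpand (pre : String) (left : List Int) (hne : left ≠ []) :
    left.flatMap (fun d =>
      match PySem.List.remove? left d with
      | none => []
      | some myL =>
        if myL.length = 0 then [pre ++ PySem.Int.toStr d]
        else (pvPerms myL.length myL).map (fun p => (pre ++ PySem.Int.toStr d) ++ p))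
    = (pvPerms left.length left).map (fun p => pre ++ p) := by
  obtain ⟨k, hk⟩ : ∃ k, left.length = k + 1 := by
    cases left with
    | nil => exact absurd rfl hne
    | cons x xs => exact ⟨xs.length, rfl⟩
  rw [hk]
  show _ = (pvPerms (k+1) left).map _
  rw [pvPerms, List.map_flatMap]
  apply List.flatMap_congr
  intro d hd
  rw [PySem.List.remove?_eq_some_erase left d hd]
  have hlen : (left.erase d).length = k := by
    have := List.length_erase_of_mem hd; omega
  by_cases h0 : (left.erase d).length = 0
  · have hk0 : k = 0 := by omega
    simp [h0]
  · simp only [hlen] at h0 ⊢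
    rw [if_neg h0, if_neg h0, List.map_map]
    simp [Function.comp_def, String.append_assoc]

theorem pvGoA_eq (n : Nat) : ∀ (dl : List Int), dl.length ≤ n → ∀ (iter : List Int),
    (∀ d ∈ iter, d ∈ dl) → ∀ (sf : List String) (res : List String),
    addDigitGo sf dl res iter
      = res ++ iter.flatMap (fun d =>
          match PySem.List.remove? dl d with
          | none => []
          | some myL =>
            if myL.length = 0 then [PySem.Str.join "" sf ++ PySem.Int.toStr d]
            else (pvPerms myL.length myL).map
              (fun p => (PySem.Str.join "" sf ++ PySem.Int.toStr d) ++ p)) := by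
  induction n with
  | zero =>
    intro dl hdl iter hmem sf res
    have hdlnil : dl = [] := by cases dl with
      | nil => rfl
      | cons x xs => simp at hdl
    cases iter with
    | nil => simp [addDigitGo]
    | cons d rest => exact absurd (hmem d (by simp)) (by simp [hdlnil])
  | succ n ih =>
    intro dl hdl iter
    induction iter with
    | nil => intro _ sf res; simp [addDigitGo]
    | cons d rest ihi =>
      intro hmem sf res
      have hd : d ∈ dl := hmem d (by simp)
      have hrem : PySem.List.remove? dl d = some (dl.erase d) :=
        PySem.List.remove?_eq_some_erase dl d hd
      have hrest : ∀ x ∈ rest, x ∈ dl := fun x hx => hmem x (List.mem_cons_of_mem d hx)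
      rw [pvGoA_cons sf dl res d rest _ hrem]
      by_cases h0 : (dl.erase d).length = 0
      · rw [if_pos h0, ihi hrest sf _]
        simp only [List.flatMap_cons, hrem, if_pos h0]
        simp [pvJoin_snoc, List.append_assoc]
      · rw [if_neg h0]
        have hlenE : (dl.erase d).length ≤ n := by
          have := List.length_erase_of_mem hd
          have : 0 < dl.length := List.length_pos_of_mem hd
          omega
        rw [ih (dl.erase d) hlenE (dl.erase d) (fun x hx => hx) (sf ++ [PySem.Int.toStr d]) res]
        have hne' : dl.erase d ≠ [] := fun hE => h0 (by simp [hE])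
        rw [pvExpand (PySem.Str.join "" (sf ++ [PySem.Int.toStr d])) (dl.erase d) hne']
        rw [ihi hrest sf _]
        simp only [List.flatMap_cons, hrem, if_neg h0]
        simp [pvJoin_snoc, List.append_assoc]

-- per-frame meaning of a stack frame
def pvG (fr : String × List Int) : List String :=
  if fr.2 = [] then [fr.1] else (pvPerms fr.2.length fr.2).map (fun p => fr.1 ++ p)

theorem pvChildrenSum (pre : String) (left : List Int) :
    ((left.map (fun d =>
        ((pre ++ PySem.Int.toStr d, (PySem.List.remove? left d).getD []) : String × List Int))).map
          (fun fr => Nat.factorial (fr.2.length + 1))).sum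
      ≤ left.length * Nat.factorial left.length := by
  rw [List.map_map]
  have hb : ∀ d ∈ left,
      (((pre ++ PySem.Int.toStr d, (PySem.List.remove? left d).getD []) : String × List Int).2.length + 1).factorial
        ≤ left.length.factorial := fun d _ => pvChildWeight pre left d
  have h1 := List.sum_le_sum hb
  rw [List.map_const', List.sum_replicate] at h1
  simp only [smul_eq_mul] at h1
  exact h1

theorem pvGoB_eq (n : Nat) : ∀ (stack : List (String × List Int)),
    (stack.map (fun fr => Nat.factorial (fr.2.length + 1))).sum ≤ n → ∀ (out : List String),
    addDigitAltGo stack out = out ++ (stack.map pvG).flatten := by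
  induction n with
  | zero =>
    intro stack hsum out
    cases stack with
    | nil => simp [addDigitAltGo]
    | cons fr rest =>
      exfalso
      simp only [List.map_cons, List.sum_cons] at hsum
      have := Nat.factorial_pos (fr.2.length + 1)
      omega
  | succ n ih =>
    intro stack hsum out
    cases stack with
    | nil => simp [addDigitAltGo]
    | cons fr rest =>
      obtain ⟨pre, left⟩ := fr
      by_cases hL : left = []
      · subst hL
        rw [addDigitAltGo]
        simp only []
        have hrest : (rest.map (fun fr => Nat.factorial (fr.2.length + 1))).sum ≤ n := by
          simp only [List.map_cons, List.sum_cons] at hsum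
          have h1 : ((([] : List Int)).length + 1).factorial = 1 := by decide
          omega
        rw [ih rest hrest]
        simp [pvG, List.append_assoc]
      · rw [addDigitAltGo]
        simp only [hL, if_false]
        have hch := pvChildrenSum pre left
        have hlt : left.length * Nat.factorial left.length < Nat.factorial (left.length + 1) := by
          rw [Nat.factorial_succ]
          have := Nat.factorial_pos left.length
          nlinarith
        have hmeas : (((left.map (fun d =>
            ((pre ++ PySem.Int.toStr d, (PySem.List.remove? left d).getD []) : String × List Int)))
              ++ rest).map (fun fr => Nat.factorial (fr.2.length + 1))).sum ≤ n := by
          simp only [List.map_append, List.sum_append]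
          simp only [List.map_cons, List.sum_cons] at hsum
          omega
        rw [ih _ hmeas]
        simp only [List.map_append, List.flatten_append, List.map_cons, List.flatten_cons,
          List.map_map, Function.comp_def]
        have hkey : ((left.map (fun d => pvG
            ((pre ++ PySem.Int.toStr d, (PySem.List.remove? left d).getD []) : String × List Int)))).flatten
            = pvG (pre, left) := by
          rw [← List.flatMap_def]
          have hcg : ∀ d ∈ left,
              pvG ((pre ++ PySem.Int.toStr d, (PySem.List.remove? left d).getD []) : String × List Int)
                = (match PySem.List.remove? left d with
                   | none => []
                   | some myL =>
                     if myL.length = 0 then [pre ++ PySem.Int.toStr d]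
                     else (pvPerms myL.length myL).map (fun p => (pre ++ PySem.Int.toStr d) ++ p)) := by
            intro d hd
            have hrem := PySem.List.remove?_eq_some_erase left d hd
            rw [hrem]
            simp only [pvG, Option.getD_some]
            by_cases hE : left.erase d = []
            · simp [hE]
            · have hlen0 : ¬ (left.erase d).length = 0 := by
                simpa [List.length_eq_zero_iff] using hE
              simp [hE, hlen0]
          rw [List.flatMap_congr hcg, pvExpand pre left hL]
          simp [pvG, hL]
        rw [hkey]

-- ===== VERDICT (by name: the statement is the Claim_ definition above) =====
theorem addDigit_spec : Claim_equal_addDigit := by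
  intro sf dl res _
  unfold Spec_addDigit addDigit addDigit_alt
  by_cases hdl : dl = []
  · subst hdl; simp [addDigitGo]
  · simp only [hdl, if_false]
    rw [pvGoA_eq dl.length dl (le_refl _) dl (fun d h => h) sf res]
    rw [pvExpand (PySem.Str.join "" sf) dl hdl]
    rw [pvGoB_eq ((([(PySem.Str.join "" sf, dl)]).map (fun fr => Nat.factorial (fr.2.length + 1))).sum) _ (le_refl _) res]
    simp [pvG, hdl]
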